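-- pv_equiv track=rewrite | github.com/d8ahazard/overmind | app/api/routes/models.py | _pick_worker
-- ===== SOURCE A (Python) =====
-- from typing import Dict, List, Optional
--
-- def _pick_worker(models: List[str]) -> str | None:
--     if not models:
--         return None
--     priority = ["mini", "nano", "o4-mini", "gpt-4o-mini", "gpt-4.1-mini", "gpt-4o"]
--     for tag in priority:
--         match = next((m for m in models if tag in m.lower()), None)
--         if match:
--             return match
--     return models[0]
-- ===== SOURCE B (Python) =====
-- def _pick_worker(models):
--     if not models:
--         return None
--     priority = ["mini", "nano", "o4-mini", "gpt-4o-mini", "gpt-4.1-mini", "gpt-4o"]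
--     big = len(priority)
--
--     def rank(m):
--         ml = m.lower()
--         for i, tag in enumerate(priority):
--             if tag in ml:
--                 return i
--         return big
--
--     best = models[0]
--     best_rank = rank(best)
--     for m in models[1:]:
--         r = rank(m)
--         if r < best_rank:
--             best, best_rank = m, r
--     return best
-- ===== Notes on version B (the rewrite author's own statement) =====
-- stated objective: alternative
-- what changed: Replaces the per-tag scan over the model list (find first model for each priority tag) with a single pass over the models that tracks the model of minimal priority rank, earliest position winning ties; the all-no-match case falls out as models[0] since all ranks are equal.
import Mathlib
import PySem

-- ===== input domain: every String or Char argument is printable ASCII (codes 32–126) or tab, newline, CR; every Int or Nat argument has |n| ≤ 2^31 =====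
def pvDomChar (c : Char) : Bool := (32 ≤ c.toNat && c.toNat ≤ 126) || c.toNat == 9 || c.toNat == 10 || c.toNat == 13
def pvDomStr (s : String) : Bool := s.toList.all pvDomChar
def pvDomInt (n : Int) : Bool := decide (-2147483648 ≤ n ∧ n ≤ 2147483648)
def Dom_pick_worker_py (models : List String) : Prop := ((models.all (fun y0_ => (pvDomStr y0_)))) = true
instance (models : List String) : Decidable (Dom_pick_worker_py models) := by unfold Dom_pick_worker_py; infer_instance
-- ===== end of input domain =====

-- B replaces A's per-tag scans over the model list by a single pass tracking the model of
-- minimal priority rank (earliest position wins ties); objective: alternative decomposition, same cost.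


-- ===== PORT A =====
-- the `for tag in priority` loop: next(...) is List.find?; `if match:` is the truthiness
-- test (None or "" falls through); after the loop, `return models[0]`
def pickLoopA (models : List String) : List String → Option String
  | [] => PySem.List.pyGet? models 0
  | tag :: ts =>
      match models.find? (fun m => PySem.Str.isIn tag (PySem.Str.lower m)) with
      | some s => if s = "" then pickLoopA models ts else some s
      | none => pickLoopA models ts

def pick_worker_py (models : List String) : Option String :=
  if models = [] then none
  else pickLoopA models ["mini", "nano", "o4-mini", "gpt-4o-mini", "gpt-4.1-mini", "gpt-4o"]

-- ===== PORT B =====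
-- rank(m): index of the first priority tag contained in m.lower(), else len(priority)
-- (the running index i plays enumerate's role)
def rankGo (ml : String) : List String → Nat → Nat
  | [], i => i
  | t :: ts, i => if PySem.Str.isIn t ml then i else rankGo ml ts (i + 1)

def rankB (priority : List String) (m : String) : Nat :=
  rankGo (PySem.Str.lower m) priority 0

-- body of B's single pass: keep (best, best_rank), update on strictly smaller rank
def pickStep (priority : List String) (acc : String × Nat) (m : String) : String × Nat :=
  let r := rankB priority m
  if r < acc.2 then (m, r) else acc

def pick_worker_py_alt (models : List String) : Option String :=
  match models with
  | [] => none
  | m0 :: rest =>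
      let priority := ["mini", "nano", "o4-mini", "gpt-4o-mini", "gpt-4.1-mini", "gpt-4o"]
      some (rest.foldl (pickStep priority) (m0, rankB priority m0)).1

-- ===== PRECONDITION & SPEC =====
def Spec_pick_worker_py (models : List String) (out : Option String) : Prop := out = pick_worker_py_alt models
instance (models : List String) (out : Option String) : Decidable (Spec_pick_worker_py models out) := by unfold Spec_pick_worker_py; infer_instance

-- ===== CLAIM (what is proved, stated in full; the proofs are below) =====
def Claim_equal_pick_worker_py : Prop := ∀ (models : List String), Dom_pick_worker_py models → Spec_pick_worker_py models (pick_worker_py models)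

-- ===== LEMMAS AND PROOFS =====

-- the tag-containment test both programs share
def pTag (t m : String) : Bool := PySem.Str.isIn t (PySem.Str.lower m)

theorem rankGo_succ (ml : String) (ts : List String) (i : Nat) :
    rankGo ml ts (i + 1) = rankGo ml ts i + 1 := by
  induction ts generalizing i with
  | nil => rfl
  | cons t ts ih => simp only [rankGo]; split <;> simp [ih]

theorem rankB_cons (t : String) (ts : List String) (m : String) :
    rankB (t :: ts) m = if pTag t m then 0 else rankB ts m + 1 := by
  simp only [rankB, rankGo, pTag]
  split <;> simp [rankGo_succ]

-- once the accumulator's rank is 0 it never changes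
theorem fold_zero (rk : String → Nat) (x : String) (l : List String) :
    l.foldl (fun acc m => if rk m < acc.2 then (m, rk m) else acc) (x, 0) = (x, 0) := by
  induction l with
  | nil => rfl
  | cons m l ih => simpa using ih

-- if some element has rank 0, the fold returns the FIRST such element
theorem fold_find_zero (rk : String → Nat) (m0 : String) (rest : List String) (m : String)
    (h : (m0 :: rest).find? (fun x => rk x == 0) = some m) :
    (rest.foldl (fun acc x => if rk x < acc.2 then (x, rk x) else acc) (m0, rk m0)).1 = m := by
  induction rest generalizing m0 with
  | nil =>
    by_cases h0 : rk m0 = 0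
    · rw [List.find?_cons_of_pos (by simp [h0])] at h
      simpa using h
    · rw [List.find?_cons_of_neg (by simp [h0])] at h
      simp at h
  | cons m1 rest ih =>
    by_cases h0 : rk m0 = 0
    · rw [List.find?_cons_of_pos (by simp [h0])] at h
      simp only [Option.some.injEq] at h
      subst h
      rw [h0, List.foldl_cons]
      simp only [Nat.not_lt_zero, if_false]
      rw [fold_zero]
    · rw [List.find?_cons_of_neg (by simp [h0])] at h
      by_cases h1 : rk m1 = 0
      · rw [List.find?_cons_of_pos (by simp [h1])] at h
        simp only [Option.some.injEq] at h
        subst h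
        rw [List.foldl_cons, if_pos (by omega)]
        rw [h1, fold_zero]
      · rw [List.find?_cons_of_neg (by simp [h1])] at h
        rw [List.foldl_cons]
        by_cases hlt : rk m1 < rk m0
        · rw [if_pos hlt]
          exact ih m1 (by rw [List.find?_cons_of_neg (by simp [h1])]; exact h)
        · rw [if_neg hlt]
          exact ih m0 (by rw [List.find?_cons_of_neg (by simp [h0])]; exact h)

-- shifting every rank by 1 does not change which element the fold picks
theorem fold_shift (rk rk' : String → Nat) (m0 : String) (rest : List String)
    (h : ∀ m ∈ m0 :: rest, rk' m = rk m + 1) :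
    (rest.foldl (fun acc x => if rk' x < acc.2 then (x, rk' x) else acc) (m0, rk' m0)).1
      = (rest.foldl (fun acc x => if rk x < acc.2 then (x, rk x) else acc) (m0, rk m0)).1 := by
  induction rest generalizing m0 with
  | nil => rfl
  | cons m1 rest ih =>
    have h0 : rk' m0 = rk m0 + 1 := h m0 (by simp)
    have h1 : rk' m1 = rk m1 + 1 := h m1 (by simp)
    rw [List.foldl_cons, List.foldl_cons, h0, h1]
    by_cases hlt : rk m1 < rk m0
    · rw [if_pos (by omega), if_pos hlt, ← h1]
      exact ih m1 (fun m hm => h m (by simp only [List.mem_cons] at hm ⊢; tauto))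
    · rw [if_neg (by omega), if_neg hlt, ← h0]
      exact ih m0 (fun m hm => h m (by simp only [List.mem_cons] at hm ⊢; tauto))

-- A's tag loop equals B's single-pass argmin, for any tag list whose tags are not found in ""
theorem main_lemma (ts : List String) (hts : ∀ t ∈ ts, pTag t "" = false)
    (m0 : String) (rest : List String) :
    pickLoopA (m0 :: rest) ts
      = some (rest.foldl (fun acc x => if rankB ts x < acc.2 then (x, rankB ts x) else acc)
          (m0, rankB ts m0)).1 := by
  induction ts with
  | nil =>
    simp only [pickLoopA]
    have : ∀ x : String, rankB ([] : List String) x = 0 := fun _ => rfl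
    simp only [this, fold_zero]
    simp [PySem.List.pyGet?, PySem.List.pyIdx?]
  | cons t ts ih =>
    have ht0 : pTag t "" = false := hts t (by simp)
    have hts' : ∀ t' ∈ ts, pTag t' "" = false := fun t' h' => hts t' (by simp [h'])
    simp only [pickLoopA]
    cases h : (m0 :: rest).find? (fun m => PySem.Str.isIn t (PySem.Str.lower m)) with
    | some s =>
      have hps : pTag t s = true := List.find?_some h
      have hs : s ≠ "" := by intro he; rw [he, ht0] at hps; exact Bool.false_ne_true hps
      dsimp only
      rw [if_neg hs]
      have hpred : (fun x => rankB (t :: ts) x == 0) = (fun m => PySem.Str.isIn t (PySem.Str.lower m)) := by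
        funext x
        rw [rankB_cons]
        simp only [pTag]
        by_cases hx : PySem.Str.isIn t (PySem.Str.lower x) = true
        · rw [if_pos hx, hx]
          decide
        · have hx' : PySem.Str.isIn t (PySem.Str.lower x) = false := by simpa using hx
          rw [if_neg (by rw [hx']; simp), hx']
          simp
      have := fold_find_zero (rankB (t :: ts)) m0 rest s (by rw [hpred]; exact h)
      rw [this]
    | none =>
      have hall : ∀ m ∈ m0 :: rest, pTag t m = false := by
        intro m hm
        have := List.find?_eq_none.mp h m hm
        simpa [pTag] using this
      have hshift : ∀ m ∈ m0 :: rest, rankB (t :: ts) m = rankB ts m + 1 := by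
        intro m hm; rw [rankB_cons, hall m hm]; simp
      dsimp only
      rw [fold_shift (rankB ts) (rankB (t :: ts)) m0 rest hshift]
      exact ih hts'

-- ===== VERDICT (by name: the statement is the Claim_ definition above) =====
theorem pick_worker_py_spec : Claim_equal_pick_worker_py := by
  intro models _
  show pick_worker_py models = pick_worker_py_alt models
  cases models with
  | nil => rfl
  | cons m0 rest =>
    simp only [pick_worker_py, pick_worker_py_alt, if_neg (List.cons_ne_nil m0 rest)]
    rw [main_lemma _ (by decide) m0 rest]
    rfl
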